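-- pv_equiv track=rewrite | github.com/ahmedomer13218/PizzaOrder_NLP-project | demo/demo.py | get_TOP
-- ===== SOURCE A (Python) =====
-- def get_TOP(words, predictions1, predictions2, predictions3):
--     result = "(ORDER "
--     i = 0
--     not_flag = False
--     c = min(len(words), len(predictions1), len(
--         predictions2), len(predictions3))
--     while i < c:
--         if i < c and predictions3[i].startswith('B-'):
--             tag = predictions3[i][2:]
--             result += f"({tag} "
--             while i < c and (predictions3[i].startswith('B-') or predictions3[i].startswith('I-')):
--                 if predictions1[i].startswith('B-'):
--                     if (predictions1[i].startswith('B-NOT_')):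
--                         result += f"(NOT ({predictions1[i][6:]} {words[i]} ) "
--                         not_flag = True
--                     else:
--                         result += f"({predictions1[i][2:]} {words[i]} ) "
--                 elif predictions2[i].startswith('B-'):
--                     # Handle multi-word drink types
--                     if i+1 < c and predictions2[i+1].startswith('I-'):
--                         result += f"({predictions2[i][2:]} {words[i]} {words[i+1]} ) "
--                         i += 1
--                     else:
--                         result += f"({predictions2[i][2:]} {words[i]} ) "
--                 else:
--                     result += f"{words[i]} "
--                 i += 1
--                 if i < c and predictions3[i] == 'O':
--                     break
--             if not_flag:
--                 result = result.rstrip() + " ) ) "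
--                 not_flag = False
--             else:
--                 result = result.rstrip() + " ) "
--         else:
--             result += f"{words[i]} "
--             i += 1
--     result = result.rstrip() + " )"
--     return result
-- ===== SOURCE B (Python) =====
-- def get_TOP(words, predictions1, predictions2, predictions3):
--     # Consume the zipped rows as a stack (top = next token); build chunks and join once.
--     stack = list(zip(words, predictions1, predictions2, predictions3))
--     stack.reverse()
--     chunks = []
--     while stack:
--         w, q1, q2, q3 = stack.pop()
--         if q3.startswith('B-'):
--             piece = ["(" + q3[2:]]
--             neg = False
--             while True:
--                 if q1.startswith('B-NOT_'):
--                     piece.append("(NOT (" + q1[6:] + " " + w + " )")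
--                     neg = True
--                 elif q1.startswith('B-'):
--                     piece.append("(" + q1[2:] + " " + w + " )")
--                 elif q2.startswith('B-'):
--                     if stack and stack[-1][2].startswith('I-'):
--                         piece.append("(" + q2[2:] + " " + w + " " + stack.pop()[0] + " )")
--                     else:
--                         piece.append("(" + q2[2:] + " " + w + " )")
--                 else:
--                     piece.append(w)
--                 if not stack:
--                     break
--                 if not (stack[-1][3].startswith('B-') or stack[-1][3].startswith('I-')):
--                     break
--                 w, q1, q2, q3 = stack.pop()
--             close = " ) )" if neg else " )"
--             chunks.append(" ".join(piece).rstrip() + close)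
--         else:
--             chunks.append(w)
--     return " ".join(["(ORDER"] + chunks).rstrip() + " )"
-- ===== Notes on version B (the rewrite author's own statement) =====
-- stated objective: faster
-- what changed: B replaces A's index-driven while loop that mutates one growing string (rstripping and copying the whole accumulated result at every segment close) by consuming the zipped token rows as a stack, rendering each segment/word into an independent chunk with a segment-local rstrip, and joining all chunks once at the end.
import Mathlib
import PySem

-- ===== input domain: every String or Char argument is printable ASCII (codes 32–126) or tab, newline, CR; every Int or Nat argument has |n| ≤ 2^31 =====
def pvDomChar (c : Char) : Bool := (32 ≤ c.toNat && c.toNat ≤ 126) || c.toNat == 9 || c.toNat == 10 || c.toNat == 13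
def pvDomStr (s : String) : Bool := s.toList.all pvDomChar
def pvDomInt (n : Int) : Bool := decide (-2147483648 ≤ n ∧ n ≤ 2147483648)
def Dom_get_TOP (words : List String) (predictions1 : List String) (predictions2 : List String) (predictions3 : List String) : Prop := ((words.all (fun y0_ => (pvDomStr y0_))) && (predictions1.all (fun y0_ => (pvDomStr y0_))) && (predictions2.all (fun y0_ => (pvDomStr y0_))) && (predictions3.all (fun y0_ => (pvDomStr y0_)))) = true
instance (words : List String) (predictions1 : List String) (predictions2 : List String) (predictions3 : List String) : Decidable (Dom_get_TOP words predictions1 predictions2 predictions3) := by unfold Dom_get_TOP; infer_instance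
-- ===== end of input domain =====

-- B consumes the zipped token rows as a stack (one structural pass over the rows,
-- pattern-matching, chunks joined once at the end) instead of A's index-driven
-- while loop that mutates one growing string and rstrips the whole accumulated
-- result at every segment close; objective: faster (measured:
-- A rstrip-copies the whole accumulated string once per segment, B joins once).
-- A's while loops are ported with fuel (fuel = c+1 suffices: the index strictly
-- increases); B's stack loops are ported with fuel = stack length + 1 (each
-- iteration pops at least one row). Both programs are pure.

-- ===== PORT A =====
-- Strings are handled as List Char (PySem.Chars); indexing l[i] happens only under
-- the guard i < c ≤ len l, so l.getD i "" is exact.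
def pvA_get (l : List String) (i : Nat) : List Char := (l.getD i "").toList

-- loop body of A's inner while (one token): returns (new result, index before the
-- final `i += 1`, new not_flag)
def pvA_body (words predictions1 predictions2 : List String) (c i : Nat)
    (result : List Char) (notf : Bool) : List Char × Nat × Bool :=
  if PySem.Chars.startswith (pvA_get predictions1 i) ['B','-'] then
    if PySem.Chars.startswith (pvA_get predictions1 i) ['B','-','N','O','T','_'] then
      (result ++ ['(','N','O','T',' ','('] ++ (pvA_get predictions1 i).drop 6 ++ [' ']
        ++ pvA_get words i ++ [' ',')',' '], i, true)
    else
      (result ++ ['('] ++ (pvA_get predictions1 i).drop 2 ++ [' ']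
        ++ pvA_get words i ++ [' ',')',' '], i, notf)
  else if PySem.Chars.startswith (pvA_get predictions2 i) ['B','-'] then
    if i + 1 < c ∧ PySem.Chars.startswith (pvA_get predictions2 (i+1)) ['I','-'] = true then
      (result ++ ['('] ++ (pvA_get predictions2 i).drop 2 ++ [' '] ++ pvA_get words i ++ [' ']
        ++ pvA_get words (i+1) ++ [' ',')',' '], i + 1, notf)
    else
      (result ++ ['('] ++ (pvA_get predictions2 i).drop 2 ++ [' ']
        ++ pvA_get words i ++ [' ',')',' '], i, notf)
  else (result ++ pvA_get words i ++ [' '], i, notf)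

-- A's inner while loop
def pvA_inner (words predictions1 predictions2 predictions3 : List String) (c : Nat) :
    Nat → Nat → List Char → Bool → Nat × List Char × Bool
  | 0, i, result, notf => (i, result, notf)
  | fuel + 1, i, result, notf =>
    if i < c ∧ (PySem.Chars.startswith (pvA_get predictions3 i) ['B','-'] = true ∨
                PySem.Chars.startswith (pvA_get predictions3 i) ['I','-'] = true) then
      if (pvA_body words predictions1 predictions2 c i result notf).2.1 + 1 < c ∧
         pvA_get predictions3 ((pvA_body words predictions1 predictions2 c i result notf).2.1 + 1) = ['O'] then
        ((pvA_body words predictions1 predictions2 c i result notf).2.1 + 1,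
         (pvA_body words predictions1 predictions2 c i result notf).1,
         (pvA_body words predictions1 predictions2 c i result notf).2.2)
      else
        pvA_inner words predictions1 predictions2 predictions3 c fuel
          ((pvA_body words predictions1 predictions2 c i result notf).2.1 + 1)
          (pvA_body words predictions1 predictions2 c i result notf).1
          (pvA_body words predictions1 predictions2 c i result notf).2.2
    else (i, result, notf)

-- A's outer while loop
def pvA_outer (words predictions1 predictions2 predictions3 : List String) (c : Nat) :
    Nat → Nat → List Char → Bool → List Char
  | 0, _, result, _ => result
  | fuel + 1, i, result, notf =>
    if i < c then
      if PySem.Chars.startswith (pvA_get predictions3 i) ['B','-'] then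
        pvA_outer words predictions1 predictions2 predictions3 c fuel
          (pvA_inner words predictions1 predictions2 predictions3 c (c+1) i
            (result ++ ['('] ++ (pvA_get predictions3 i).drop 2 ++ [' ']) notf).1
          (if (pvA_inner words predictions1 predictions2 predictions3 c (c+1) i
                (result ++ ['('] ++ (pvA_get predictions3 i).drop 2 ++ [' ']) notf).2.2 then
             PySem.Chars.rstrip (pvA_inner words predictions1 predictions2 predictions3 c (c+1) i
               (result ++ ['('] ++ (pvA_get predictions3 i).drop 2 ++ [' ']) notf).2.1
               ++ [' ',')',' ',')',' ']
           else
             PySem.Chars.rstrip (pvA_inner words predictions1 predictions2 predictions3 c (c+1) i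
               (result ++ ['('] ++ (pvA_get predictions3 i).drop 2 ++ [' ']) notf).2.1
               ++ [' ',')',' '])
          (if (pvA_inner words predictions1 predictions2 predictions3 c (c+1) i
                (result ++ ['('] ++ (pvA_get predictions3 i).drop 2 ++ [' ']) notf).2.2 then false
           else (pvA_inner words predictions1 predictions2 predictions3 c (c+1) i
                (result ++ ['('] ++ (pvA_get predictions3 i).drop 2 ++ [' ']) notf).2.2)
      else
        pvA_outer words predictions1 predictions2 predictions3 c fuel (i + 1)
          (result ++ pvA_get words i ++ [' ']) notf
    else result

def get_TOP (words : List String) (predictions1 : List String) (predictions2 : List String) (predictions3 : List String) : String :=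
  String.ofList
    (PySem.Chars.rstrip
      (pvA_outer words predictions1 predictions2 predictions3
        (min (min (min words.length predictions1.length) predictions2.length) predictions3.length)
        ((min (min (min words.length predictions1.length) predictions2.length) predictions3.length) + 1)
        0 ['(','O','R','D','E','R',' '] false) ++ [' ',')'])

-- ===== PORT B =====
-- `list(zip(...))`: truncating 4-way zip into rows (w, q1, q2, q3)
def pvB_rows : List String → List String → List String → List String →
    List (List Char × List Char × List Char × List Char)
  | w :: ws, a :: as, b :: bs, d :: ds => (w.toList, a.toList, b.toList, d.toList) :: pvB_rows ws as bs ds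
  | _, _, _, _ => []

-- `stack[-1][3].startswith('B-') or stack[-1][3].startswith('I-')`
def pvB_startsBI (q : List Char) : Bool :=
  PySem.Chars.startswith q ['B','-'] || PySem.Chars.startswith q ['I','-']

-- " ".join
def pvB_join (ps : List (List Char)) : List Char := (List.intersperse [' '] ps).flatten

-- B's inner `while True` over the stack; pvB_step is the if/elif chain of the
-- loop body: current row + stack ↦ (piece entry, not-flag, stack after an
-- optional multi-word pop).  The reversed Python stack pops from its end,
-- i.e. consumes the row list front-to-back: the list head is the stack top.
def pvB_step (row : List Char × List Char × List Char × List Char)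
    (stack : List (List Char × List Char × List Char × List Char)) :
    List Char × Bool × List (List Char × List Char × List Char × List Char) :=
  if PySem.Chars.startswith row.2.1 ['B','-','N','O','T','_'] then
    (['(','N','O','T',' ','('] ++ row.2.1.drop 6 ++ [' '] ++ row.1 ++ [' ',')'], true, stack)
  else if PySem.Chars.startswith row.2.1 ['B','-'] then
    (['('] ++ row.2.1.drop 2 ++ [' '] ++ row.1 ++ [' ',')'], false, stack)
  else if PySem.Chars.startswith row.2.2.1 ['B','-'] then
    match stack with
    | (w2, _, t2, _) :: rest =>
      if PySem.Chars.startswith t2 ['I','-'] then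
        (['('] ++ row.2.2.1.drop 2 ++ [' '] ++ row.1 ++ [' '] ++ w2 ++ [' ',')'], false, rest)
      else (['('] ++ row.2.2.1.drop 2 ++ [' '] ++ row.1 ++ [' ',')'], false, stack)
    | [] => (['('] ++ row.2.2.1.drop 2 ++ [' '] ++ row.1 ++ [' ',')'], false, stack)
  else (row.1, false, stack)

def pvB_seg : Nat → (List Char × List Char × List Char × List Char) →
    List (List Char × List Char × List Char × List Char) →
    List (List Char) × Bool × List (List Char × List Char × List Char × List Char)
  | 0, _, stack => ([], false, stack)
  | fuel + 1, row, stack =>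
    match (pvB_step row stack).2.2 with
    | [] => ([(pvB_step row stack).1], (pvB_step row stack).2.1, [])
    | r2 :: rest =>
      if pvB_startsBI r2.2.2.2 then
        ((pvB_step row stack).1 :: (pvB_seg fuel r2 rest).1,
         (pvB_step row stack).2.1 || (pvB_seg fuel r2 rest).2.1,
         (pvB_seg fuel r2 rest).2.2)
      else ([(pvB_step row stack).1], (pvB_step row stack).2.1, r2 :: rest)

-- B's outer `while stack`: pop a row, emit a chunk
def pvB_chunks : Nat → List String → List String →
    List (List Char × List Char × List Char × List Char) → List (List Char)
  | 0, _, _, _ => []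
  | _ + 1, _, _, [] => []
  | fuel + 1, words, predictions1, (row :: rest) =>
    if PySem.Chars.startswith row.2.2.2 ['B','-'] then
      (PySem.Chars.rstrip (pvB_join (('(' :: row.2.2.2.drop 2) :: (pvB_seg (rest.length + 1) row rest).1))
        ++ (if (pvB_seg (rest.length + 1) row rest).2.1 then [' ',')',' ',')'] else [' ',')']))
        :: pvB_chunks fuel words predictions1 (pvB_seg (rest.length + 1) row rest).2.2
    else row.1 :: pvB_chunks fuel words predictions1 rest

def get_TOP_alt (words : List String) (predictions1 : List String) (predictions2 : List String) (predictions3 : List String) : String :=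
  String.ofList
    (PySem.Chars.rstrip
      (pvB_join (['(','O','R','D','E','R'] ::
        pvB_chunks ((pvB_rows words predictions1 predictions2 predictions3).length + 1)
          words predictions1 (pvB_rows words predictions1 predictions2 predictions3)))
      ++ [' ',')'])

-- ===== PRECONDITION & SPEC =====
def Spec_get_TOP (words : List String) (predictions1 : List String) (predictions2 : List String) (predictions3 : List String) (out : String) : Prop := out = get_TOP_alt words predictions1 predictions2 predictions3
instance (words : List String) (predictions1 : List String) (predictions2 : List String) (predictions3 : List String) (out : String) : Decidable (Spec_get_TOP words predictions1 predictions2 predictions3 out) := by unfold Spec_get_TOP; infer_instance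

-- ===== CLAIM (what is proved, stated in full; the proofs are below) =====
def Claim_equal_get_TOP : Prop := ∀ (words : List String) (predictions1 : List String) (predictions2 : List String) (predictions3 : List String), Dom_get_TOP words predictions1 predictions2 predictions3 → Spec_get_TOP words predictions1 predictions2 predictions3 (get_TOP words predictions1 predictions2 predictions3)

-- ===== LEMMAS AND PROOFS =====
theorem pv_rstrip_append (a s : List Char) (x : Char) (hx : x ∈ s)
    (hxs : PySem.Chars.isspace x = false) :
    PySem.Chars.rstrip (a ++ s) = a ++ PySem.Chars.rstrip s := by
  have hne : ¬ (List.dropWhile PySem.Chars.isspace s.reverse = []) := by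
    rw [List.dropWhile_eq_nil_iff]
    intro hall
    have := hall x (by simpa using hx)
    simp [this] at hxs
  simp [PySem.Chars.rstrip, List.reverse_append, List.dropWhile_append, hne]

theorem pv_rstrip_space (s : List Char) :
    PySem.Chars.rstrip (s ++ [' ']) = PySem.Chars.rstrip s := by
  simp [PySem.Chars.rstrip, List.reverse_append, show PySem.Chars.isspace ' ' = true from rfl]

-- join of a cons, with the trailing space moved inside
theorem pv_join_cons (x : List Char) (l : List (List Char)) :
    pvB_join (x :: l) ++ [' '] = x ++ [' '] ++ (l.map (· ++ [' '])).flatten := by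
  unfold pvB_join
  induction l generalizing x with
  | nil => simp
  | cons y t ih =>
    rw [List.intersperse_cons₂, List.flatten_cons, List.flatten_cons]
    simp only [List.map_cons, List.flatten_cons]
    have := ih y
    simp only [List.append_assoc] at *
    rw [this]

theorem pv_rows_length (ws as bs ds : List String) :
    (pvB_rows ws as bs ds).length = min (min (min ws.length as.length) bs.length) ds.length := by
  induction ws generalizing as bs ds with
  | nil => cases as <;> cases bs <;> cases ds <;> simp [pvB_rows]
  | cons w ws ih =>
    cases as with
    | nil => simp [pvB_rows]
    | cons a as =>
      cases bs with
      | nil => simp [pvB_rows]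
      | cons b bs =>
        cases ds with
        | nil => simp [pvB_rows]
        | cons d ds => simp [pvB_rows, ih]

def pvRowAt (words predictions1 predictions2 predictions3 : List String) (i : Nat) :
    List Char × List Char × List Char × List Char :=
  (pvA_get words i, pvA_get predictions1 i, pvA_get predictions2 i, pvA_get predictions3 i)

theorem pv_rows_drop (ws as bs ds : List String) (i : Nat)
    (h : i < min (min (min ws.length as.length) bs.length) ds.length) :
    (pvB_rows ws as bs ds).drop i = pvRowAt ws as bs ds i :: (pvB_rows ws as bs ds).drop (i+1) := by
  induction ws generalizing as bs ds i with
  | nil => simp at h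
  | cons w ws ih =>
    cases as with
    | nil => simp at h
    | cons a as =>
      cases bs with
      | nil => simp at h
      | cons b bs =>
        cases ds with
        | nil => simp at h
        | cons d ds =>
          cases i with
          | zero => simp [pvB_rows, pvRowAt, pvA_get]
          | succ j =>
            have hj : j < min (min (min ws.length as.length) bs.length) ds.length := by
              simp at h ⊢; omega
            simpa [pvB_rows, pvRowAt, pvA_get] using ih as bs ds j hj

theorem pv_rows_drop_ge (ws as bs ds : List String) (i : Nat)
    (h : min (min (min ws.length as.length) bs.length) ds.length ≤ i) :
    (pvB_rows ws as bs ds).drop i = [] := by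
  apply List.drop_eq_nil_of_le
  rw [pv_rows_length]; exact h

theorem pv_startswith_of_not (s : List Char)
    (h : PySem.Chars.startswith s ['B','-','N','O','T','_'] = true) :
    PySem.Chars.startswith s ['B','-'] = true := by
  rw [PySem.Chars.startswith_iff] at h ⊢
  exact List.IsPrefix.trans (by decide) h

theorem pv_startsBI_ne_O (q : List Char) (h : pvB_startsBI q = true) : q ≠ ['O'] := by
  intro hq; subst hq; simp [pvB_startsBI, PySem.Chars.startswith] at h

theorem pv_inner_stop (words predictions1 predictions2 predictions3 : List String) (c : Nat)
    (f i : Nat) (r : List Char) (n : Bool)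
    (h : ¬ (i < c ∧ (PySem.Chars.startswith (pvA_get predictions3 i) ['B','-'] = true ∨
                     PySem.Chars.startswith (pvA_get predictions3 i) ['I','-'] = true))) :
    pvA_inner words predictions1 predictions2 predictions3 c f i r n = (i, r, n) := by
  cases f <;> simp [pvA_inner, h]

theorem pv_mem_join_head (x : List Char) (l : List (List Char)) (ch : Char) (hc : ch ∈ x) :
    ch ∈ pvB_join (x :: l) := by
  unfold pvB_join
  cases l with
  | nil => simpa using hc
  | cons y t => rw [List.intersperse_cons₂]; simp; exact Or.inl hc

theorem pvRowAt_w (ws as bs ds : List String) (i : Nat) :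
    (pvRowAt ws as bs ds i).1 = pvA_get ws i := rfl

theorem pvRowAt_p3 (ws as bs ds : List String) (i : Nat) :
    (pvRowAt ws as bs ds i).2.2.2 = pvA_get ds i := rfl

theorem pv_chunks_nil (f : Nat) (ws as : List String) : pvB_chunks f ws as [] = [] := by
  cases f <;> simp [pvB_chunks]

-- one token of A's inner loop body = pvB_step on the corresponding row/stack
theorem pv_step_eq (words predictions1 predictions2 predictions3 : List String)
    (c : Nat) (hc : c = min (min (min words.length predictions1.length) predictions2.length) predictions3.length)
    (i : Nat) (hi : i < c) (result : List Char) (notf : Bool) :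
    ∃ e n k,
      pvB_step (pvRowAt words predictions1 predictions2 predictions3 i)
        ((pvB_rows words predictions1 predictions2 predictions3).drop (i+1)) =
        (e, n, (pvB_rows words predictions1 predictions2 predictions3).drop (k+1)) ∧
      pvA_body words predictions1 predictions2 c i result notf = (result ++ e ++ [' '], k, notf || n) ∧
      i ≤ k ∧ k + 1 ≤ c := by
  by_cases hN : PySem.Chars.startswith (pvA_get predictions1 i) ['B','-','N','O','T','_'] = true
  · refine ⟨['(','N','O','T',' ','('] ++ (pvA_get predictions1 i).drop 6 ++ [' '] ++ pvA_get words i ++ [' ',')'],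
      true, i, ?_, ?_, le_refl i, hi⟩
    · simp [pvB_step, pvRowAt, hN]
    · simp [pvA_body, pv_startswith_of_not _ hN, hN]
  · by_cases hB1 : PySem.Chars.startswith (pvA_get predictions1 i) ['B','-'] = true
    · refine ⟨['('] ++ (pvA_get predictions1 i).drop 2 ++ [' '] ++ pvA_get words i ++ [' ',')'],
        false, i, ?_, ?_, le_refl i, hi⟩
      · simp [pvB_step, pvRowAt, hN, hB1]
      · simp [pvA_body, hB1, hN]
    · by_cases hB2 : PySem.Chars.startswith (pvA_get predictions2 i) ['B','-'] = true
      · by_cases hi1 : i + 1 < c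
        · by_cases hI : PySem.Chars.startswith (pvA_get predictions2 (i+1)) ['I','-'] = true
          · refine ⟨['('] ++ (pvA_get predictions2 i).drop 2 ++ [' '] ++ pvA_get words i ++ [' ']
                ++ pvA_get words (i+1) ++ [' ',')'], false, i + 1, ?_, ?_, by omega, by omega⟩
            · rw [pv_rows_drop words predictions1 predictions2 predictions3 (i+1) (hc ▸ hi1)]
              simp [pvB_step, pvRowAt, hN, hB1, hB2, hI]
            · simp [pvA_body, hB1, hB2, hi1, hI]
          · refine ⟨['('] ++ (pvA_get predictions2 i).drop 2 ++ [' '] ++ pvA_get words i ++ [' ',')'],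
              false, i, ?_, ?_, le_refl i, hi⟩
            · rw [pv_rows_drop words predictions1 predictions2 predictions3 (i+1) (hc ▸ hi1)]
              simp [pvB_step, pvRowAt, hN, hB1, hB2, hI]
            · simp [pvA_body, hB1, hB2, hI]
        · have hnil : (pvB_rows words predictions1 predictions2 predictions3).drop (i+1) = [] :=
            pv_rows_drop_ge _ _ _ _ _ (by omega)
          refine ⟨['('] ++ (pvA_get predictions2 i).drop 2 ++ [' '] ++ pvA_get words i ++ [' ',')'],
            false, i, ?_, ?_, le_refl i, hi⟩
          · rw [hnil]; simp [pvB_step, pvRowAt, hN, hB1, hB2]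
          · simp [pvA_body, hB1, hB2, hi1]
      · refine ⟨pvA_get words i, false, i, ?_, ?_, le_refl i, hi⟩
        · simp [pvB_step, pvRowAt, hN, hB1, hB2]
        · simp [pvA_body, hB1, hB2]

-- A's inner while loop = B's stack segment scan
theorem pv_seg_eq (words predictions1 predictions2 predictions3 : List String)
    (c : Nat) (hc : c = min (min (min words.length predictions1.length) predictions2.length) predictions3.length) :
    ∀ fA fB i result notf, c - i ≤ fA → c - i ≤ fB → i < c →
    (PySem.Chars.startswith (pvA_get predictions3 i) ['B','-'] = true ∨
     PySem.Chars.startswith (pvA_get predictions3 i) ['I','-'] = true) →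
    ∃ i', i < i' ∧ i' ≤ c ∧
      (pvB_seg fB (pvRowAt words predictions1 predictions2 predictions3 i)
        ((pvB_rows words predictions1 predictions2 predictions3).drop (i+1))).2.2 =
        (pvB_rows words predictions1 predictions2 predictions3).drop i' ∧
      pvA_inner words predictions1 predictions2 predictions3 c fA i result notf =
        (i', result ++ (((pvB_seg fB (pvRowAt words predictions1 predictions2 predictions3 i)
            ((pvB_rows words predictions1 predictions2 predictions3).drop (i+1))).1).map (· ++ [' '])).flatten,
          notf || (pvB_seg fB (pvRowAt words predictions1 predictions2 predictions3 i)
            ((pvB_rows words predictions1 predictions2 predictions3).drop (i+1))).2.1) := by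
  intro fA
  induction fA with
  | zero => intro fB i result notf hfA hfB hi h3; omega
  | succ fA ih =>
    intro fB i result notf hfA hfB hi h3
    obtain ⟨g, rfl⟩ : ∃ g, fB = g + 1 := ⟨fB - 1, by omega⟩
    obtain ⟨e, n, k, hstep, hbody, hik, hkc⟩ :=
      pv_step_eq words predictions1 predictions2 predictions3 c hc i hi result notf
    rw [pvA_inner, if_pos ⟨hi, h3⟩, hbody]
    have hseg : pvB_seg (g+1) (pvRowAt words predictions1 predictions2 predictions3 i)
        ((pvB_rows words predictions1 predictions2 predictions3).drop (i+1)) =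
        match (pvB_rows words predictions1 predictions2 predictions3).drop (k+1) with
        | [] => ([e], n, [])
        | r2 :: rest =>
          if pvB_startsBI r2.2.2.2 then
            (e :: (pvB_seg g r2 rest).1, n || (pvB_seg g r2 rest).2.1, (pvB_seg g r2 rest).2.2)
          else ([e], n, r2 :: rest) := by
      rw [pvB_seg, hstep]
    by_cases hk1 : k + 1 < c
    · have hdropk := pv_rows_drop words predictions1 predictions2 predictions3 (k+1) (hc ▸ hk1)
      by_cases hBI : pvB_startsBI (pvA_get predictions3 (k+1)) = true
      · -- the segment continues at k+1
        have hO : ¬ (k + 1 < c ∧ pvA_get predictions3 (k+1) = ['O']) := by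
          rintro ⟨-, hO⟩; exact pv_startsBI_ne_O _ hBI hO
        rw [if_neg hO]
        have h3' : PySem.Chars.startswith (pvA_get predictions3 (k+1)) ['B','-'] = true ∨
            PySem.Chars.startswith (pvA_get predictions3 (k+1)) ['I','-'] = true := by
          simpa [pvB_startsBI] using hBI
        obtain ⟨i', hii', hi'c, hs', heq⟩ := ih g (k+1) (result ++ e ++ [' ']) (notf || n)
          (by omega) (by omega) hk1 h3'
        refine ⟨i', by omega, hi'c, ?_, ?_⟩
        · rw [hseg, hdropk]
          simpa [pvRowAt, hBI] using hs'
        · rw [heq, hseg, hdropk]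
          simp [pvRowAt, hBI, Bool.or_assoc]
      · -- next token ends the segment ('O' or no tag): A stops, B stops
        have hstop : pvA_inner words predictions1 predictions2 predictions3 c fA (k+1)
            (result ++ e ++ [' ']) (notf || n) = (k+1, result ++ e ++ [' '], notf || n) := by
          apply pv_inner_stop
          rintro ⟨-, h⟩
          rcases h with h | h <;> simp [pvB_startsBI, h] at hBI
        have hBIf : pvB_startsBI (pvA_get predictions3 (k+1)) = false := by
          simpa using hBI
        refine ⟨k+1, by omega, hk1.le, ?_, ?_⟩
        · rw [hseg, hdropk]
          simp [pvRowAt, hBIf]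
        · rw [hseg, hdropk]
          by_cases hO : pvA_get predictions3 (k+1) = ['O']
          · rw [if_pos ⟨hk1, hO⟩]
            simp [pvRowAt, hBIf]
          · rw [if_neg (by rintro ⟨-, h⟩; exact hO h), hstop]
            simp [pvRowAt, hBIf]
    · -- k+1 ≥ c : rows exhausted
      have hnil : (pvB_rows words predictions1 predictions2 predictions3).drop (k+1) = [] :=
        pv_rows_drop_ge _ _ _ _ _ (by omega)
      have hO : ¬ (k + 1 < c ∧ pvA_get predictions3 (k+1) = ['O']) := by rintro ⟨h, -⟩; omega
      rw [if_neg hO]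
      have hstop : pvA_inner words predictions1 predictions2 predictions3 c fA (k+1)
          (result ++ e ++ [' ']) (notf || n) = (k+1, result ++ e ++ [' '], notf || n) := by
        apply pv_inner_stop; rintro ⟨h, -⟩; omega
      refine ⟨k+1, by omega, by omega, ?_, ?_⟩
      · rw [hseg, hnil]
      · rw [hstop, hseg, hnil]
        simp

-- A's outer while loop = B's chunk pass
theorem pv_outer_eq (words predictions1 predictions2 predictions3 : List String)
    (c : Nat) (hc : c = min (min (min words.length predictions1.length) predictions2.length) predictions3.length) :
    ∀ fA fB i result, c - i ≤ fA → c - i ≤ fB →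
    pvA_outer words predictions1 predictions2 predictions3 c fA i result false =
      result ++ ((pvB_chunks fB words predictions1
        ((pvB_rows words predictions1 predictions2 predictions3).drop i)).map (· ++ [' '])).flatten := by
  intro fA
  induction fA with
  | zero =>
    intro fB i result hfA hfB
    have hge : c ≤ i := by omega
    rw [pv_rows_drop_ge words predictions1 predictions2 predictions3 i (hc ▸ hge),
        pv_chunks_nil, pvA_outer]
    simp
  | succ fA ih =>
    intro fB i result hfA hfB
    by_cases hi : i < c
    · obtain ⟨g, rfl⟩ : ∃ g, fB = g + 1 := ⟨fB - 1, by omega⟩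
      have hdrop := pv_rows_drop words predictions1 predictions2 predictions3 i (hc ▸ hi)
      by_cases hB : PySem.Chars.startswith (pvA_get predictions3 i) ['B','-'] = true
      · -- segment chunk
        have hlen : ((pvB_rows words predictions1 predictions2 predictions3).drop (i+1)).length + 1 = c - i := by
          rw [List.length_drop, pv_rows_length]; omega
        obtain ⟨i', hii', hi'c, hs, heq⟩ := pv_seg_eq words predictions1 predictions2 predictions3 c hc
          (c+1) (((pvB_rows words predictions1 predictions2 predictions3).drop (i+1)).length + 1)
          i (result ++ ['('] ++ (pvA_get predictions3 i).drop 2 ++ [' ']) false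
          (by omega) (by omega) hi (Or.inl hB)
        rw [pvA_outer, if_pos hi, if_pos hB, heq, hdrop]
        have hchB : pvB_chunks (g+1) words predictions1
            (pvRowAt words predictions1 predictions2 predictions3 i ::
              (pvB_rows words predictions1 predictions2 predictions3).drop (i+1)) =
            (PySem.Chars.rstrip (pvB_join (('(' :: (pvA_get predictions3 i).drop 2) ::
                (pvB_seg (((pvB_rows words predictions1 predictions2 predictions3).drop (i+1)).length + 1)
                  (pvRowAt words predictions1 predictions2 predictions3 i)
                  ((pvB_rows words predictions1 predictions2 predictions3).drop (i+1))).1))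
              ++ (if (pvB_seg (((pvB_rows words predictions1 predictions2 predictions3).drop (i+1)).length + 1)
                    (pvRowAt words predictions1 predictions2 predictions3 i)
                    ((pvB_rows words predictions1 predictions2 predictions3).drop (i+1))).2.1
                  then [' ',')',' ',')'] else [' ',')']))
              :: pvB_chunks g words predictions1
                ((pvB_rows words predictions1 predictions2 predictions3).drop i') := by
          rw [pvB_chunks]
          simp only [pvRowAt_p3]
          rw [if_pos hB, hs]
        rw [hchB]
        -- the string A accumulates = result ++ (B's chunk ++ ' ')
        set ps := (pvB_seg (((pvB_rows words predictions1 predictions2 predictions3).drop (i+1)).length + 1)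
          (pvRowAt words predictions1 predictions2 predictions3 i)
          ((pvB_rows words predictions1 predictions2 predictions3).drop (i+1))).1 with hps
    -- inner string rstrip
        have hinner : PySem.Chars.rstrip ((result ++ ['('] ++ (pvA_get predictions3 i).drop 2 ++ [' '])
            ++ (ps.map (· ++ [' '])).flatten) =
            result ++ PySem.Chars.rstrip (pvB_join (('(' :: (pvA_get predictions3 i).drop 2) :: ps)) := by
          have h1 : (result ++ ['('] ++ (pvA_get predictions3 i).drop 2 ++ [' '])
              ++ (ps.map (· ++ [' '])).flatten =
              result ++ (pvB_join (('(' :: (pvA_get predictions3 i).drop 2) :: ps) ++ [' ']) := by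
            rw [pv_join_cons]
            simp
          rw [h1, ← List.append_assoc, pv_rstrip_space,
            pv_rstrip_append result _ '(' (pv_mem_join_head _ _ '(' (by simp)) (by decide)]
        cases hn : (pvB_seg (((pvB_rows words predictions1 predictions2 predictions3).drop (i+1)).length + 1)
            (pvRowAt words predictions1 predictions2 predictions3 i)
            ((pvB_rows words predictions1 predictions2 predictions3).drop (i+1))).2.1 with
        | true =>
          simp only [Bool.false_or, if_true]
          rw [hinner, ih g i' _ (by omega) (by omega)]
          simp
        | false =>
          simp only [Bool.false_or, Bool.false_eq_true, if_false]
          rw [hinner, ih g i' _ (by omega) (by omega)]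
          simp
      · -- plain word chunk
        rw [pvA_outer, if_pos hi, if_neg hB, hdrop, pvB_chunks]
        simp only [pvRowAt_p3, pvRowAt_w]
        rw [if_neg hB, ih g (i+1) _ (by omega) (by omega)]
        simp
    · rw [pv_rows_drop_ge words predictions1 predictions2 predictions3 i (hc ▸ (by omega)),
        pv_chunks_nil, pvA_outer, if_neg hi]
      simp

-- ===== VERDICT (by name: the statement is the Claim_ definition above) =====
theorem get_TOP_spec : Claim_equal_get_TOP := by
  intro words predictions1 predictions2 predictions3 _
  unfold Spec_get_TOP get_TOP get_TOP_alt
  rw [pv_outer_eq words predictions1 predictions2 predictions3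
      (min (min (min words.length predictions1.length) predictions2.length) predictions3.length) rfl
      (min (min (min words.length predictions1.length) predictions2.length) predictions3.length + 1)
      ((pvB_rows words predictions1 predictions2 predictions3).length + 1) 0
      ['(','O','R','D','E','R',' '] (by omega) (by rw [pv_rows_length]; omega),
    List.drop_zero]
  have hmain : ['(','O','R','D','E','R',' '] ++
      ((pvB_chunks ((pvB_rows words predictions1 predictions2 predictions3).length + 1) words predictions1
        (pvB_rows words predictions1 predictions2 predictions3)).map (· ++ [' '])).flatten =
      pvB_join (['(','O','R','D','E','R'] ::
        pvB_chunks ((pvB_rows words predictions1 predictions2 predictions3).length + 1) words predictions1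
          (pvB_rows words predictions1 predictions2 predictions3)) ++ [' '] := by
    rw [pv_join_cons]
    simp
  rw [hmain, pv_rstrip_space]
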